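-- pv_equiv track=rewrite | github.com/lukastk/repoyard | pts/mod/_utils/03_logical_expressions.pct.py | _parse_not_expression
-- ===== SOURCE A (Python) =====
-- def _parse_or_expression(
--     tokens: list[str], pos: list[int], box_groups: set[str]
-- ) -> bool:
--     """Parse OR expressions (lowest precedence)."""
--     left = _parse_and_expression(tokens, pos, box_groups)
--
--     while pos[0] < len(tokens) and tokens[pos[0]] == "OR":
--         pos[0] += 1
--         right = _parse_and_expression(tokens, pos, box_groups)
--         left = left or right
--
--     return left
--
-- def _parse_and_expression(
--     tokens: list[str], pos: list[int], box_groups: set[str]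
-- ) -> bool:
--     """Parse AND expressions (medium precedence)."""
--     left = _parse_not_expression(tokens, pos, box_groups)
--
--     while pos[0] < len(tokens) and tokens[pos[0]] == "AND":
--         pos[0] += 1
--         right = _parse_not_expression(tokens, pos, box_groups)
--         left = left and right
--
--     return left
--
-- def _parse_not_expression(
--     tokens: list[str], pos: list[int], box_groups: set[str]
-- ) -> bool:
--     """Parse NOT expressions and atoms (highest precedence)."""
--     if pos[0] >= len(tokens):
--         raise ValueError("Unexpected end of expression")
--
--     # Handle NOT operator
--     if tokens[pos[0]] == "NOT":
--         pos[0] += 1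
--         return not _parse_not_expression(tokens, pos, box_groups)
--
--     # Handle parentheses
--     if tokens[pos[0]] == "(":
--         pos[0] += 1
--         result = _parse_or_expression(tokens, pos, box_groups)
--         if pos[0] >= len(tokens) or tokens[pos[0]] != ")":
--             raise ValueError("Unmatched opening parenthesis")
--         pos[0] += 1
--         return result
--
--     # Handle group name (identifier)
--     if tokens[pos[0]] in ("AND", "OR", ")"):
--         raise ValueError(f"Unexpected operator or parenthesis: {tokens[pos[0]]}")
--
--     group_name = tokens[pos[0]]
--     pos[0] += 1
--     return group_name in box_groups
-- ===== SOURCE B (Python) =====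
-- _PREC = {"OR": 1, "AND": 2}
--
-- def _parse_not_expression(tokens, pos, box_groups):
--     """Parse one atom / NOT-chain (the entry); parenthesised groups use a
--     single precedence-climbing expression parser instead of one function
--     per precedence level."""
--     if pos[0] >= len(tokens):
--         raise ValueError("Unexpected end of expression")
--     tok = tokens[pos[0]]
--     if tok == "NOT":
--         pos[0] += 1
--         return not _parse_not_expression(tokens, pos, box_groups)
--     if tok == "(":
--         pos[0] += 1
--         result = _parse_expr(tokens, pos, box_groups, 1)
--         if pos[0] >= len(tokens) or tokens[pos[0]] != ")":
--             raise ValueError("Unmatched opening parenthesis")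
--         pos[0] += 1
--         return result
--     if tok in ("AND", "OR", ")"):
--         raise ValueError(f"Unexpected operator or parenthesis: {tok}")
--     pos[0] += 1
--     return tok in box_groups
--
-- def _parse_expr(tokens, pos, box_groups, min_prec):
--     left = _parse_not_expression(tokens, pos, box_groups)
--     while pos[0] < len(tokens) and _PREC.get(tokens[pos[0]], 0) >= min_prec:
--         op = tokens[pos[0]]
--         pos[0] += 1
--         right = _parse_expr(tokens, pos, box_groups, _PREC[op] + 1)
--         left = (left or right) if op == "OR" else (left and right)
--     return left
-- ===== Notes on version B (the rewrite author's own statement) =====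
-- stated objective: idiomatic
-- what changed: Replaces the three mutually-recursive precedence-level functions (_parse_or_expression / _parse_and_expression / _parse_not_expression) by a single precedence-climbing parser: one atom parser plus one expression loop parse_expr(min_prec) driven by a precedence dict, folding with or/and by operator precedence.
import Mathlib
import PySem

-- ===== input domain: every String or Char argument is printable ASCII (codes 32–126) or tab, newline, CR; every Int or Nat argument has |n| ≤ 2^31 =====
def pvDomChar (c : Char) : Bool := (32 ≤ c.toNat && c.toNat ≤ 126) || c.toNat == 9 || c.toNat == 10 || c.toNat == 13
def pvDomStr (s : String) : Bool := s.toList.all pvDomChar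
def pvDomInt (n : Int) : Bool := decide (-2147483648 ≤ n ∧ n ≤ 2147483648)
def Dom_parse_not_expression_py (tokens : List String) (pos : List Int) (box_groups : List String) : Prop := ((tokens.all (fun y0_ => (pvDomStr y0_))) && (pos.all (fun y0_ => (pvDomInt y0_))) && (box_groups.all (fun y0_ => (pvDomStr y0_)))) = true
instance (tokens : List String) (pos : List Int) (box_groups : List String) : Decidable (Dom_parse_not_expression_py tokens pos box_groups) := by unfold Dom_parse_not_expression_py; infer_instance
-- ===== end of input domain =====

-- B replaces A's three mutually-recursive precedence-level functions by a single
-- precedence-climbing parser (one atom parser plus one operator-climbing loop driven by a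
-- precedence dict); same return value everywhere A returns. In Python both A and B advance
-- pos[0] in place identically; the equivalence proved here is about the RETURN value.
-- The ports thread the current position explicitly and carry a fuel argument decremented on
-- every recursive call, purely to make the recursion total (none = the Python raises, or
-- fuel ran out; the entry fuel 6*len+6 is beyond the deepest reachable recursion).

-- ===== PORT A =====
mutual
def pvNotA (tokens : List String) (bg : List String) : Nat → Int → Option (Bool × Int)
  | 0, _ => none
  | Nat.succ f, p =>
    if (tokens.length : Int) ≤ p then none
    else
      match PySem.List.pyGet? tokens p with
      | none => none
      | some t =>
        if t = "NOT" then
          (pvNotA tokens bg f (p + 1)).map (fun r => (!r.1, r.2))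
        else if t = "(" then
          match pvOrA tokens bg f (p + 1) with
          | none => none
          | some (v, q) =>
            if (tokens.length : Int) ≤ q then none
            else
              match PySem.List.pyGet? tokens q with
              | none => none
              | some u => if u ≠ ")" then none else some (v, q + 1)
        else if t = "AND" ∨ t = "OR" ∨ t = ")" then none
        else some (decide (t ∈ bg), p + 1)

def pvAndA (tokens : List String) (bg : List String) : Nat → Int → Option (Bool × Int)
  | 0, _ => none
  | Nat.succ f, p =>
    match pvNotA tokens bg f p with
    | none => none
    | some (v, q) => pvAndLoopA tokens bg f v q

def pvAndLoopA (tokens : List String) (bg : List String) : Nat → Bool → Int → Option (Bool × Int)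
  | 0, _, _ => none
  | Nat.succ f, v, p =>
    if p < (tokens.length : Int) then
      match PySem.List.pyGet? tokens p with
      | none => none
      | some t =>
        if t = "AND" then
          match pvNotA tokens bg f (p + 1) with
          | none => none
          | some (r, q) => pvAndLoopA tokens bg f (v && r) q
        else some (v, p)
    else some (v, p)

def pvOrA (tokens : List String) (bg : List String) : Nat → Int → Option (Bool × Int)
  | 0, _ => none
  | Nat.succ f, p =>
    match pvAndA tokens bg f p with
    | none => none
    | some (v, q) => pvOrLoopA tokens bg f v q

def pvOrLoopA (tokens : List String) (bg : List String) : Nat → Bool → Int → Option (Bool × Int)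
  | 0, _, _ => none
  | Nat.succ f, v, p =>
    if p < (tokens.length : Int) then
      match PySem.List.pyGet? tokens p with
      | none => none
      | some t =>
        if t = "OR" then
          match pvAndA tokens bg f (p + 1) with
          | none => none
          | some (r, q) => pvOrLoopA tokens bg f (v || r) q
        else some (v, p)
    else some (v, p)
end

def parse_not_expression_py (tokens : List String) (pos : List Int) (box_groups : List String) : Bool :=
  match PySem.List.pyGet? pos 0 with
  | none => false          -- pos[0] raises IndexError on empty pos; excluded by Pre_
  | some p =>
    match pvNotA tokens box_groups (6 * tokens.length + 6) p with
    | none => false        -- runs on which A raises (ValueError/IndexError) are excluded by Pre_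
    | some r => r.1

-- ===== PORT B =====
def pvPREC : PySem.Dict String Int := PySem.Dict.ofList [("OR", 1), ("AND", 2)]

def pvPrec (t : String) : Int := PySem.Dict.getD pvPREC t 0

mutual
def pvAtomB (tokens : List String) (bg : List String) : Nat → Int → Option (Bool × Int)
  | 0, _ => none
  | Nat.succ f, p =>
    if (tokens.length : Int) ≤ p then none
    else
      match PySem.List.pyGet? tokens p with
      | none => none
      | some t =>
        if t = "NOT" then
          (pvAtomB tokens bg f (p + 1)).map (fun r => (!r.1, r.2))
        else if t = "(" then
          match pvExprB tokens bg f 1 (p + 1) with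
          | none => none
          | some (v, q) =>
            if (tokens.length : Int) ≤ q then none
            else
              match PySem.List.pyGet? tokens q with
              | none => none
              | some u => if u ≠ ")" then none else some (v, q + 1)
        else if t = "AND" ∨ t = "OR" ∨ t = ")" then none
        else some (decide (t ∈ bg), p + 1)

def pvExprB (tokens : List String) (bg : List String) : Nat → Int → Int → Option (Bool × Int)
  | 0, _, _ => none
  | Nat.succ f, mp, p =>
    match pvAtomB tokens bg f p with
    | none => none
    | some (v, q) => pvExprLoopB tokens bg f mp v q

def pvExprLoopB (tokens : List String) (bg : List String) : Nat → Int → Bool → Int → Option (Bool × Int)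
  | 0, _, _, _ => none
  | Nat.succ f, mp, v, p =>
    if p < (tokens.length : Int) then
      match PySem.List.pyGet? tokens p with
      | none => none
      | some t =>
        if mp ≤ pvPrec t then
          match pvExprB tokens bg f (pvPrec t + 1) (p + 1) with
          | none => none
          | some (r, q) => pvExprLoopB tokens bg f mp (if t = "OR" then v || r else v && r) q
        else some (v, p)
    else some (v, p)
end

def parse_not_expression_py_alt (tokens : List String) (pos : List Int) (box_groups : List String) : Bool :=
  match PySem.List.pyGet? pos 0 with
  | none => false
  | some p =>
    match pvAtomB tokens box_groups (6 * tokens.length + 6) p with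
    | none => false
    | some r => r.1

-- ===== PRECONDITION & SPEC =====
-- Pre_ holds exactly when pos is nonempty and a well-formed expression of the grammar
--   Atom := "NOT" Atom | "(" Expr ")" | identifier ;  Expr := Atom (("AND"|"OR") Atom)*
-- starts at index pos[0] of tokens (Python indexing, so a negative pos[0] reads from the
-- end); everywhere else Python A raises (ValueError, or IndexError on empty pos /
-- pos[0] < -len(tokens)).  Well-formedness of an expression is inherently a grammar
-- condition, so it is stated as a minimal recognizer of the flat grammar above (one
-- operator alternation, no precedence levels, no boolean evaluation — unlike either port).
mutual
def pvCheckAtom (tokens : List String) : Nat → Int → Option Int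
  | 0, _ => none
  | Nat.succ f, p =>
    if (tokens.length : Int) ≤ p then none
    else
      match PySem.List.pyGet? tokens p with
      | none => none
      | some t =>
        if t = "NOT" then pvCheckAtom tokens f (p + 1)
        else if t = "(" then
          match pvCheckExpr tokens f (p + 1) with
          | none => none
          | some q =>
            if (tokens.length : Int) ≤ q then none
            else
              match PySem.List.pyGet? tokens q with
              | none => none
              | some u => if u = ")" then some (q + 1) else none
        else if t = "AND" ∨ t = "OR" ∨ t = ")" then none
        else some (p + 1)

def pvCheckOps (tokens : List String) : Nat → Int → Option Int
  | 0, _ => none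
  | Nat.succ f, p =>
    if p < (tokens.length : Int) then
      match PySem.List.pyGet? tokens p with
      | none => none
      | some t =>
        if t = "AND" ∨ t = "OR" then
          match pvCheckAtom tokens f (p + 1) with
          | none => none
          | some q => pvCheckOps tokens f q
        else some p
    else some p

def pvCheckExpr (tokens : List String) : Nat → Int → Option Int
  | 0, _ => none
  | Nat.succ f, p =>
    match pvCheckAtom tokens f p with
    | none => none
    | some q => pvCheckOps tokens f q
end

def Pre_parse_not_expression_py (tokens : List String) (pos : List Int) (box_groups : List String) : Prop :=
  ((PySem.List.pyGet? pos 0).bind (fun p => pvCheckAtom tokens (6 * tokens.length + 6) p)).isSome = true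

instance (tokens : List String) (pos : List Int) (box_groups : List String) : Decidable (Pre_parse_not_expression_py tokens pos box_groups) := by
  unfold Pre_parse_not_expression_py; infer_instance

def pvWitness_parse_not_expression_py : List String × List Int × List String :=
  (["NOT", "(", "a", "OR", "b", ")"], [0], ["a"])

def Spec_parse_not_expression_py (tokens : List String) (pos : List Int) (box_groups : List String) (out : Bool) : Prop := out = parse_not_expression_py_alt tokens pos box_groups
instance (tokens : List String) (pos : List Int) (box_groups : List String) (out : Bool) : Decidable (Spec_parse_not_expression_py tokens pos box_groups out) := by unfold Spec_parse_not_expression_py; infer_instance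

-- ===== CLAIM (what is proved, stated in full; the proofs are below) =====
def Claim_equal_parse_not_expression_py : Prop := ∀ (tokens : List String) (pos : List Int) (box_groups : List String), Dom_parse_not_expression_py tokens pos box_groups → Pre_parse_not_expression_py tokens pos box_groups → Spec_parse_not_expression_py tokens pos box_groups (parse_not_expression_py tokens pos box_groups)

-- ===== LEMMAS AND PROOFS =====

theorem pv_witness_ok :
    Dom_parse_not_expression_py pvWitness_parse_not_expression_py.1 pvWitness_parse_not_expression_py.2.1 pvWitness_parse_not_expression_py.2.2 ∧
    Pre_parse_not_expression_py pvWitness_parse_not_expression_py.1 pvWitness_parse_not_expression_py.2.1 pvWitness_parse_not_expression_py.2.2 := by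
  constructor <;> decide

-- pvPrec on the two-entry dict, in closed form
theorem pvPrec_eq (t : String) :
    pvPrec t = if t = "OR" then 1 else if t = "AND" then 2 else 0 := by
  by_cases h1 : t = "OR"
  · subst h1; decide
  by_cases h2 : t = "AND"
  · subst h2; decide
  have e1 : ("OR" == t) = false := beq_eq_false_iff_ne.mpr (Ne.symm h1)
  have e2 : ("AND" == t) = false := beq_eq_false_iff_ne.mpr (Ne.symm h2)
  have hd : pvPREC = PySem.Dict.mk [("OR", 1), ("AND", 2)] := by decide
  simp [pvPrec, hd, PySem.Dict.getD, PySem.Dict.get?, List.find?, e1, e2, h1, h2]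

-- remaining distance to the end of the token list (proof-side measure)
def pvM (tokens : List String) (p : Int) : Nat := ((tokens.length : Int) - p).toNat

-- progress: a successful parse consumes at least one token; a loop never moves backwards
theorem pvProgressA (tokens bg : List String) (f : Nat) :
    (∀ p v q, pvNotA tokens bg f p = some (v, q) → p < q) ∧
    (∀ p v q, pvAndA tokens bg f p = some (v, q) → p < q) ∧
    (∀ v p v' q, pvAndLoopA tokens bg f v p = some (v', q) → p ≤ q) ∧
    (∀ p v q, pvOrA tokens bg f p = some (v, q) → p < q) ∧
    (∀ v p v' q, pvOrLoopA tokens bg f v p = some (v', q) → p ≤ q) := by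
  induction f with
  | zero => simp [pvNotA, pvAndA, pvAndLoopA, pvOrA, pvOrLoopA]
  | succ f ih =>
    obtain ⟨ihN, ihA, ihAL, ihO, ihOL⟩ := ih
    refine ⟨?_, ?_, ?_, ?_, ?_⟩
    · intro p v q h
      simp only [pvNotA] at h
      split at h; · exact absurd h (by simp)
      split at h; · exact absurd h (by simp)
      split at h
      · rw [Option.map_eq_some_iff] at h
        obtain ⟨r, hr, he⟩ := h
        have h1 := ihN (p+1) r.1 r.2 (by simpa using hr)
        have h2 : r.2 = q := congrArg Prod.snd he
        omega
      split at h
      · split at h; · exact absurd h (by simp)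
        rename_i v0 q0 hr
        have h1 := ihO (p+1) v0 q0 hr
        split at h; · exact absurd h (by simp)
        split at h; · exact absurd h (by simp)
        split at h; · exact absurd h (by simp)
        have h2 : q0 + 1 = q := congrArg Prod.snd (Option.some.inj h)
        omega
      split at h; · exact absurd h (by simp)
      have h2 : p + 1 = q := congrArg Prod.snd (Option.some.inj h)
      omega
    · intro p v q h
      simp only [pvAndA] at h
      split at h; · exact absurd h (by simp)
      rename_i v0 q0 hr
      have h1 := ihN p v0 q0 hr
      have h2 := ihAL v0 q0 v q h
      omega
    · intro v p v' q h
      simp only [pvAndLoopA] at h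
      split at h
      · split at h; · exact absurd h (by simp)
        split at h
        · split at h; · exact absurd h (by simp)
          rename_i r0 q0 hr
          have h1 := ihN (p+1) r0 q0 hr
          have h2 := ihAL (v && r0) q0 v' q h
          omega
        · have h2 : p = q := congrArg Prod.snd (Option.some.inj h)
          omega
      · have h2 : p = q := congrArg Prod.snd (Option.some.inj h)
        omega
    · intro p v q h
      simp only [pvOrA] at h
      split at h; · exact absurd h (by simp)
      rename_i v0 q0 hr
      have h1 := ihA p v0 q0 hr
      have h2 := ihOL v0 q0 v q h
      omega
    · intro v p v' q h
      simp only [pvOrLoopA] at h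
      split at h
      · split at h; · exact absurd h (by simp)
        split at h
        · split at h; · exact absurd h (by simp)
          rename_i r0 q0 hr
          have h1 := ihA (p+1) r0 q0 hr
          have h2 := ihOL (v || r0) q0 v' q h
          omega
        · have h2 : p = q := congrArg Prod.snd (Option.some.inj h)
          omega
      · have h2 : p = q := congrArg Prod.snd (Option.some.inj h)
        omega

theorem pvProgressB (tokens bg : List String) (f : Nat) :
    (∀ p v q, pvAtomB tokens bg f p = some (v, q) → p < q) ∧
    (∀ mp p v q, pvExprB tokens bg f mp p = some (v, q) → p < q) ∧
    (∀ mp v p v' q, pvExprLoopB tokens bg f mp v p = some (v', q) → p ≤ q) := by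
  induction f with
  | zero => simp [pvAtomB, pvExprB, pvExprLoopB]
  | succ f ih =>
    obtain ⟨ihN, ihE, ihEL⟩ := ih
    refine ⟨?_, ?_, ?_⟩
    · intro p v q h
      simp only [pvAtomB] at h
      split at h; · exact absurd h (by simp)
      split at h; · exact absurd h (by simp)
      split at h
      · rw [Option.map_eq_some_iff] at h
        obtain ⟨r, hr, he⟩ := h
        have h1 := ihN (p+1) r.1 r.2 (by simpa using hr)
        have h2 : r.2 = q := congrArg Prod.snd he
        omega
      split at h
      · split at h; · exact absurd h (by simp)
        rename_i v0 q0 hr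
        have h1 := ihE 1 (p+1) v0 q0 hr
        split at h; · exact absurd h (by simp)
        split at h; · exact absurd h (by simp)
        split at h; · exact absurd h (by simp)
        have h2 : q0 + 1 = q := congrArg Prod.snd (Option.some.inj h)
        omega
      split at h; · exact absurd h (by simp)
      have h2 : p + 1 = q := congrArg Prod.snd (Option.some.inj h)
      omega
    · intro mp p v q h
      simp only [pvExprB] at h
      split at h; · exact absurd h (by simp)
      rename_i v0 q0 hr
      have h1 := ihN p v0 q0 hr
      have h2 := ihEL mp v0 q0 v q h
      omega
    · intro mp v p v' q h
      simp only [pvExprLoopB] at h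
      split at h
      · split at h; · exact absurd h (by simp)
        split at h
        · split at h; · exact absurd h (by simp)
          rename_i r0 q0 hr
          have h1 := ihE _ (p+1) r0 q0 hr
          have h2 := ihEL mp _ q0 v' q h
          omega
        · have h2 : p = q := congrArg Prod.snd (Option.some.inj h)
          omega
      · have h2 : p = q := congrArg Prod.snd (Option.some.inj h)
        omega

-- an AND-loop only exits where the next token is not "AND"
theorem pvAndLoopA_exit (tokens bg : List String) (f : Nat) :
    ∀ v p v' q, pvAndLoopA tokens bg f v p = some (v', q) →
      (q < (tokens.length : Int) → PySem.List.pyGet? tokens q ≠ some "AND") := by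
  induction f with
  | zero => simp [pvAndLoopA]
  | succ f ih =>
    intro v p v' q h
    simp only [pvAndLoopA] at h
    split at h
    · split at h; · exact absurd h (by simp)
      rename_i t ht
      split at h
      · split at h; · exact absurd h (by simp)
        rename_i r0 q0 hr
        exact ih (v && r0) q0 v' q h
      · obtain ⟨he1, he2⟩ := Prod.mk.injEq .. ▸ Option.some.inj h
        subst he2
        intro _ hc
        rename_i hne _
        rw [ht] at hc
        exact hne (Option.some.inj hc)
    · obtain ⟨he1, he2⟩ := Prod.mk.injEq .. ▸ Option.some.inj h
      subst he2
      intro hc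
      omega

-- the level-3 climb loop is the identity (no operator has precedence ≥ 3), except that it
-- still evaluates the guard, which raises where the wrapped-around index is out of range
theorem pvExprLoopB_three (tokens bg : List String) (f : Nat) (v : Bool) (p : Int) :
    pvExprLoopB tokens bg (f + 1) 3 v p =
      if p < (tokens.length : Int) then
        (match PySem.List.pyGet? tokens p with
          | none => none
          | some _ => some (v, p))
      else some (v, p) := by
  simp only [pvExprLoopB]
  split
  · cases PySem.List.pyGet? tokens p with
    | none => rfl
    | some t =>
      have hle : ¬ ((3:Int) ≤ pvPrec t) := by
        rw [pvPrec_eq]; split_ifs <;> norm_num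
      simp [hle]
  · rfl

set_option maxHeartbeats 1000000 in
-- the main correspondence, with fuel margins 3·m (A side) and 2·m (B side)
theorem pvMain (tokens bg : List String) (fa : Nat) :
    (∀ fb p, 3 * pvM tokens p < fa → 2 * pvM tokens p < fb →
      pvNotA tokens bg fa p = pvAtomB tokens bg fb p) ∧
    (∀ fb v p, 3 * pvM tokens p < fa → 2 * pvM tokens p < fb →
      pvAndLoopA tokens bg fa v p = pvExprLoopB tokens bg fb 2 v p) ∧
    (∀ fb p, 3 * pvM tokens p + 1 < fa → 2 * pvM tokens p + 1 < fb →
      pvAndA tokens bg fa p = pvExprB tokens bg fb 2 p) ∧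
    (∀ fb v p, (p < (tokens.length : Int) → PySem.List.pyGet? tokens p ≠ some "AND") →
      3 * pvM tokens p + 1 < fa → 2 * pvM tokens p < fb →
      pvOrLoopA tokens bg fa v p = pvExprLoopB tokens bg fb 1 v p) ∧
    (∀ fb v p, 3 * pvM tokens p + 1 < fa → 2 * pvM tokens p < fb →
      ((match pvExprLoopB tokens bg fb 2 v p with
        | none => none
        | some (v1, q1) => pvOrLoopA tokens bg fa v1 q1) =
        pvExprLoopB tokens bg fb 1 v p)) ∧
    (∀ fb p, 3 * pvM tokens p + 2 < fa → 2 * pvM tokens p + 1 < fb →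
      pvOrA tokens bg fa p = pvExprB tokens bg fb 1 p) := by
  induction fa with
  | zero =>
    refine ⟨?_, ?_, ?_, ?_, ?_, ?_⟩ <;> · intro fb p; try intro p'
                                          omega
  | succ n IH =>
    obtain ⟨ihN, ihAL, ihA, ihOL, ihBind, ihO⟩ := IH
    have progN := (pvProgressA tokens bg n).1
    have progAndA := (pvProgressA tokens bg n).2.1
    have progAtomB : ∀ fb p v q, pvAtomB tokens bg fb p = some (v, q) → p < q :=
      fun fb => (pvProgressB tokens bg fb).1
    have progExprB : ∀ fb mp p v q, pvExprB tokens bg fb mp p = some (v, q) → p < q :=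
      fun fb => (pvProgressB tokens bg fb).2.1
    -- (1) NOT level = atom
    have S1 : ∀ fb p, 3 * pvM tokens p < n + 1 → 2 * pvM tokens p < fb →
        pvNotA tokens bg (n+1) p = pvAtomB tokens bg fb p := by
      intro fb p hma hmb
      obtain ⟨fb', rfl⟩ : ∃ k, fb = k + 1 := ⟨fb - 1, by omega⟩
      simp only [pvNotA, pvAtomB]
      by_cases hp : (tokens.length : Int) ≤ p
      · simp [hp]
      simp only [if_neg hp]
      have hm1 : 1 ≤ pvM tokens p := by simp only [pvM]; omega
      cases hg : PySem.List.pyGet? tokens p with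
      | none => simp
      | some t =>
        simp only []
        by_cases hNOT : t = "NOT"
        · simp only [if_pos hNOT]
          rw [ihN fb' (p+1) (by simp only [pvM] at hma hmb ⊢; omega) (by simp only [pvM] at hma hmb ⊢; omega)]
        simp only [if_neg hNOT]
        by_cases hPar : t = "("
        · simp only [if_pos hPar]
          rw [ihO fb' (p+1) (by simp only [pvM] at hma hmb ⊢; omega) (by simp only [pvM] at hma hmb ⊢; omega)]
        simp only [if_neg hPar]
    -- (3) AND loop = climb loop at level 2
    have S3 : ∀ fb v p, 3 * pvM tokens p < n + 1 → 2 * pvM tokens p < fb →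
        pvAndLoopA tokens bg (n+1) v p = pvExprLoopB tokens bg fb 2 v p := by
      intro fb v p hma hmb
      obtain ⟨fb', rfl⟩ : ∃ k, fb = k + 1 := ⟨fb - 1, by omega⟩
      simp only [pvAndLoopA, pvExprLoopB]
      by_cases hp : p < (tokens.length : Int)
      · simp only [if_pos hp]
        have hm1 : 1 ≤ pvM tokens p := by simp only [pvM]; omega
        cases hg : PySem.List.pyGet? tokens p with
        | none => simp
        | some t =>
          simp only []
          by_cases hAND : t = "AND"
          · have hpv : pvPrec t = 2 := by rw [pvPrec_eq]; simp [hAND]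
            have h2p : (2:Int) ≤ pvPrec t := by rw [hpv]
            rw [if_pos hAND, if_pos h2p, hpv]
            have h3 : (2:Int) + 1 = 3 := by norm_num
            rw [h3]
            obtain ⟨fb'', rfl⟩ : ∃ k, fb' = k + 1 := ⟨fb' - 1, by omega⟩
            simp only [pvExprB]
            rw [← ihN fb'' (p+1) (by simp only [pvM] at hma hmb ⊢; omega) (by simp only [pvM] at hma hmb ⊢; omega)]
            cases hr : pvNotA tokens bg n (p+1) with
            | none => simp
            | some r =>
              obtain ⟨r0, q0⟩ := r
              have hq0 : p + 1 < q0 := progN (p+1) r0 q0 hr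
              simp only []
              obtain ⟨fb3, rfl⟩ : ∃ k, fb'' = k + 1 := ⟨fb'' - 1, by simp only [pvM] at hma hmb ⊢; omega⟩
              rw [pvExprLoopB_three]
              have hAndFold : (if t = "OR" then v || r0 else v && r0) = (v && r0) := by
                simp [hAND]
              by_cases hqL : q0 < (tokens.length : Int)
              · simp only [if_pos hqL]
                cases hgq : PySem.List.pyGet? tokens q0 with
                | none =>
                  simp only []
                  obtain ⟨n0, rfl⟩ : ∃ k, n = k + 1 := ⟨n - 1, by simp only [pvM] at hma hmb ⊢; omega⟩
                  simp [pvAndLoopA, hqL, hgq]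
                | some u =>
                  simp only [hAndFold]
                  exact ihAL (fb3+1+1) (v && r0) q0 (by simp only [pvM] at hma hmb ⊢; omega)
                    (by simp only [pvM] at hma hmb ⊢; omega)
              · simp only [if_neg hqL, hAndFold]
                exact ihAL (fb3+1+1) (v && r0) q0 (by simp only [pvM] at hma hmb ⊢; omega)
                  (by simp only [pvM] at hma hmb ⊢; omega)
          · have h2p : ¬ ((2:Int) ≤ pvPrec t) := by
              rw [pvPrec_eq]
              by_cases e1 : t = "OR"
              · simp [e1]
              by_cases e2 : t = "AND"
              · exact absurd e2 hAND
              simp [e1, e2]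
            rw [if_neg hAND, if_neg h2p]
      · simp [hp]
    -- (2) AND level = climb at level 2
    have S2 : ∀ fb p, 3 * pvM tokens p + 1 < n + 1 → 2 * pvM tokens p + 1 < fb →
        pvAndA tokens bg (n+1) p = pvExprB tokens bg fb 2 p := by
      intro fb p hma hmb
      obtain ⟨fb', rfl⟩ : ∃ k, fb = k + 1 := ⟨fb - 1, by omega⟩
      simp only [pvAndA, pvExprB]
      rw [ihN fb' p (by omega) (by omega)]
      cases hr : pvAtomB tokens bg fb' p with
      | none => simp
      | some r =>
        obtain ⟨v0, q0⟩ := r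
        have hq0 : p < q0 := progAtomB fb' p v0 q0 hr
        simp only []
        exact ihAL fb' v0 q0 (by simp only [pvM] at hma hmb ⊢; omega) (by simp only [pvM] at hma hmb ⊢; omega)
    -- (5) OR loop = climb loop at level 1, away from a pending AND
    have S5 : ∀ fb v p, (p < (tokens.length : Int) → PySem.List.pyGet? tokens p ≠ some "AND") →
        3 * pvM tokens p + 1 < n + 1 → 2 * pvM tokens p < fb →
        pvOrLoopA tokens bg (n+1) v p = pvExprLoopB tokens bg fb 1 v p := by
      intro fb v p hex hma hmb
      obtain ⟨fb', rfl⟩ : ∃ k, fb = k + 1 := ⟨fb - 1, by omega⟩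
      simp only [pvOrLoopA, pvExprLoopB]
      by_cases hp : p < (tokens.length : Int)
      · simp only [if_pos hp]
        have hm1 : 1 ≤ pvM tokens p := by simp only [pvM]; omega
        cases hg : PySem.List.pyGet? tokens p with
        | none => simp
        | some t =>
          simp only []
          have htA : t ≠ "AND" := fun h => (hex hp) (h ▸ hg)
          by_cases hOR : t = "OR"
          · have hpv : pvPrec t = 1 := by rw [pvPrec_eq]; simp [hOR]
            have h1p : (1:Int) ≤ pvPrec t := by rw [hpv]
            rw [if_pos hOR, if_pos h1p, hpv]
            have h3 : (1:Int) + 1 = 2 := by norm_num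
            rw [h3]
            rw [ihA fb' (p+1) (by simp only [pvM] at hma hmb ⊢; omega) (by simp only [pvM] at hma hmb ⊢; omega)]
            cases hr : pvExprB tokens bg fb' 2 (p+1) with
            | none => simp
            | some r =>
              obtain ⟨r0, q0⟩ := r
              have hq0 : p + 1 < q0 := progExprB fb' 2 (p+1) r0 q0 hr
              have hOrFold : (if t = "OR" then v || r0 else v && r0) = (v || r0) := by
                simp [hOR]
              simp only [hOrFold]
              have hex' : q0 < (tokens.length : Int) → PySem.List.pyGet? tokens q0 ≠ some "AND" := by
                cases fb' with
                | zero => simp [pvExprB] at hr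
                | succ fb'' =>
                  simp only [pvExprB] at hr
                  rw [← ihN fb'' (p+1) (by simp only [pvM] at hma hmb ⊢; omega)
                    (by simp only [pvM] at hma hmb ⊢; omega)] at hr
                  split at hr
                  · exact absurd hr (by simp)
                  rename_i v1 q1 hr1
                  rw [← S3 fb'' v1 q1 (by
                        have := progN (p+1) v1 q1 hr1
                        simp only [pvM] at hma hmb ⊢; omega)
                      (by
                        have := progN (p+1) v1 q1 hr1
                        simp only [pvM] at hma hmb ⊢; omega)] at hr
                  exact pvAndLoopA_exit tokens bg (n+1) v1 q1 r0 q0 hr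
              exact ihOL fb' (v || r0) q0 hex' (by simp only [pvM] at hma hmb ⊢; omega)
                (by simp only [pvM] at hma hmb ⊢; omega)
          · have h1p : ¬ ((1:Int) ≤ pvPrec t) := by
              rw [pvPrec_eq]
              by_cases e1 : t = "OR"
              · exact absurd e1 hOR
              by_cases e2 : t = "AND"
              · exact absurd e2 htA
              simp [e1, e2]
            rw [if_neg hOR, if_neg h1p]
      · simp [hp]
    -- (6) climbing at level 2 then finishing the OR loop = climbing at level 1
    have S6 : ∀ fb v p, 3 * pvM tokens p + 1 < n + 1 → 2 * pvM tokens p < fb →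
        ((match pvExprLoopB tokens bg fb 2 v p with
          | none => none
          | some (v1, q1) => pvOrLoopA tokens bg (n+1) v1 q1) =
          pvExprLoopB tokens bg fb 1 v p) := by
      intro fb
      induction fb with
      | zero => intro v p h1 h2; omega
      | succ fb' ihfb =>
        intro v p hma hmb
        by_cases hp : p < (tokens.length : Int)
        · have hm1 : 1 ≤ pvM tokens p := by simp only [pvM]; omega
          cases hg : PySem.List.pyGet? tokens p with
          | none => simp [pvExprLoopB, hp, hg]
          | some t =>
            by_cases h2p : (2:Int) ≤ pvPrec t
            · have hAND : t = "AND" := by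
                rw [pvPrec_eq] at h2p
                split_ifs at h2p with e1 e2
                · omega
                · exact e2
                · omega
              have h1p : (1:Int) ≤ pvPrec t := by omega
              simp only [pvExprLoopB, if_pos hp, hg, if_pos h2p, if_pos h1p]
              cases he : pvExprB tokens bg fb' (pvPrec t + 1) (p+1) with
              | none => simp
              | some r =>
                obtain ⟨r0, q0⟩ := r
                have hq0 : p + 1 < q0 := progExprB fb' _ (p+1) r0 q0 he
                simp only []
                exact ihfb _ q0 (by simp only [pvM] at hma hmb ⊢; omega)
                  (by simp only [pvM] at hma hmb ⊢; omega)
            · have hExit : pvExprLoopB tokens bg (fb'+1) 2 v p = some (v, p) := by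
                simp [pvExprLoopB, hp, hg, h2p]
              rw [hExit]
              have hex : p < (tokens.length : Int) → PySem.List.pyGet? tokens p ≠ some "AND" := by
                intro _ hc
                rw [hg] at hc
                have : t = "AND" := Option.some.inj hc
                rw [pvPrec_eq, this] at h2p
                simp at h2p
              exact S5 (fb'+1) v p hex hma hmb
        · have hExit : pvExprLoopB tokens bg (fb'+1) 2 v p = some (v, p) := by
            simp [pvExprLoopB, hp]
          rw [hExit]
          exact S5 (fb'+1) v p (fun h => absurd h hp) hma hmb
    -- (4) OR level = climb at level 1
    have S4 : ∀ fb p, 3 * pvM tokens p + 2 < n + 1 → 2 * pvM tokens p + 1 < fb →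
        pvOrA tokens bg (n+1) p = pvExprB tokens bg fb 1 p := by
      intro fb p hma hmb
      obtain ⟨fb', rfl⟩ : ∃ k, fb = k + 1 := ⟨fb - 1, by omega⟩
      simp only [pvOrA, pvExprB]
      rw [ihA (fb'+1) p (by omega) (by omega)]
      simp only [pvExprB]
      cases hr : pvAtomB tokens bg fb' p with
      | none => simp
      | some r =>
        obtain ⟨v0, q0⟩ := r
        have hq0 : p < q0 := progAtomB fb' p v0 q0 hr
        simp only []
        exact ihBind fb' v0 q0 (by simp only [pvM] at hma hmb ⊢; omega)
          (by simp only [pvM] at hma hmb ⊢; omega)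
    exact ⟨S1, S3, S2, S5, S6, S4⟩

theorem pvNotA_eq_pvAtomB (tokens bg : List String) (p : Int) :
    pvNotA tokens bg (6 * tokens.length + 6) p = pvAtomB tokens bg (6 * tokens.length + 6) p := by
  by_cases hp : -(tokens.length : Int) ≤ p
  · exact (pvMain tokens bg (6 * tokens.length + 6)).1 (6 * tokens.length + 6) p
      (by simp only [pvM]; omega) (by simp only [pvM]; omega)
  · have hg : PySem.List.pyGet? tokens p = none := by
      rw [PySem.List.pyGet?_eq_none_iff]
      simp only [PySem.Raise.InRange]
      omega
    have h6 : 6 * tokens.length + 6 = (6 * tokens.length + 5) + 1 := rfl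
    rw [h6]
    simp only [pvNotA, pvAtomB]
    by_cases hple : (tokens.length : Int) ≤ p
    · simp [hple]
    · simp [hple, hg]

theorem entries_eq (tokens : List String) (pos : List Int) (box_groups : List String) :
    parse_not_expression_py tokens pos box_groups = parse_not_expression_py_alt tokens pos box_groups := by
  unfold parse_not_expression_py parse_not_expression_py_alt
  cases PySem.List.pyGet? pos 0 with
  | none => rfl
  | some p => simp only [pvNotA_eq_pvAtomB]

-- ===== VERDICT (by name: the statement is the Claim_ definition above) =====
theorem parse_not_expression_py_spec : Claim_equal_parse_not_expression_py := by
  intro tokens pos box_groups _ _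
  unfold Spec_parse_not_expression_py
  exact entries_eq tokens pos box_groups
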